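-- pv_equiv track=rewrite | github.com/dllaira/HCIU-urbanization-metric | HCIUplot_tools.py | get_model_vars
-- ===== SOURCE A (Python) =====
-- def get_model_vars (model_str):
--     '''
--     get the names of the model variables from the model identification strings
--     '_A_TIA' and '_A_HCIU'
--
--     Parameters
--     ----------
--     model_str : str
--         either '_A_TIA' or '_A_HCIU'
--
--     Returns
--     -------
--     v_vars : list of str
--         list of model variable names
--
--     '''
--     v_vars = []
--     var_name = ''
--     for el in model_str:
--         if el == '_':
--             if var_name != '':
--                 v_vars.append(var_name)
--                 var_name = ''
--         else:
--             var_name = var_name+el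
--     if not var_name in v_vars:
--         v_vars.append(var_name)
--     return v_vars
-- ===== SOURCE B (Python) =====
-- def get_model_vars(model_str):
--     parts = model_str.split('_')
--     v_vars = [p for p in parts[:-1] if p]
--     last = parts[-1]
--     if last not in v_vars:
--         v_vars.append(last)
--     return v_vars
-- ===== Notes on version B (the rewrite author's own statement) =====
-- stated objective: faster
-- what changed: Replaces the char-by-char accumulator loop (with quadratic string concatenation) by one split on underscore, a filter of the non-final tokens, and a separate dedup-append of the final token.
import Mathlib
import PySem

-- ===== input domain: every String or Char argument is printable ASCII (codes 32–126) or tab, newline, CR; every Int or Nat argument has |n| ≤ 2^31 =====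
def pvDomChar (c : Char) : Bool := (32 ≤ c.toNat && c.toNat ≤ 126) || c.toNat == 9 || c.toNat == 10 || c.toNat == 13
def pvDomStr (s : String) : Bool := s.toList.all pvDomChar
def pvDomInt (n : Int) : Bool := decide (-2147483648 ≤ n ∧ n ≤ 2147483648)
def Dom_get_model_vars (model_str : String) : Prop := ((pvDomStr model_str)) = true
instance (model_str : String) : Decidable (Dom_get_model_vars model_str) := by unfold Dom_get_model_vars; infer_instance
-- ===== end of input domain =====

-- B is the idiomatic rewrite: split('_'), keep non-empty interior tokens, then append the final token unless already present.


-- ===== PORT A =====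
-- A's char-by-char loop; Python strings are carried as List Char and converted at the end.
-- One loop iteration of A: on '_' flush a non-empty var_name, else extend var_name.
def pvStepA (st : List (List Char) × List Char) (el : Char) : List (List Char) × List Char :=
  if el = '_' then
    if st.2 ≠ [] then (st.1 ++ [st.2], []) else (st.1, st.2)
  else (st.1, st.2 ++ [el])

def get_model_vars (model_str : String) : List String :=
  let st := model_str.toList.foldl pvStepA ([], [])
  let v_vars := if st.2 ∈ st.1 then st.1 else st.1 ++ [st.2]
  v_vars.map String.ofList

-- ===== PORT B =====
def get_model_vars_alt (model_str : String) : List String :=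
  let parts := PySem.Chars.splitOn model_str.toList ['_']
  let v_vars := (PySem.List.slice parts none (some (-1))).filter (fun p => p ≠ [])
  let last := PySem.List.pyGetD parts (-1) []
  let v_vars := if last ∈ v_vars then v_vars else v_vars ++ [last]
  v_vars.map String.ofList

-- ===== PRECONDITION & SPEC =====
def Spec_get_model_vars (model_str : String) (out : List String) : Prop := out = get_model_vars_alt model_str
instance (model_str : String) (out : List String) : Decidable (Spec_get_model_vars model_str out) := by unfold Spec_get_model_vars; infer_instance

-- ===== CLAIM (what is proved, stated in full; the proofs are below) =====
def Claim_equal_get_model_vars : Prop := ∀ (model_str : String), Dom_get_model_vars model_str → Spec_get_model_vars model_str (get_model_vars model_str)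

-- ===== LEMMAS AND PROOFS =====

/-- Simple structural split on '_' (always returns a nonempty list of tokens). -/
def split1 : List Char → List (List Char)
  | [] => [[]]
  | c :: cs => if c = '_' then [] :: split1 cs
               else match split1 cs with
                    | [] => [[c]]
                    | t :: ts => (c :: t) :: ts

/-- Prepend a transformation to the head token. -/
def mapHead (f : List Char → List Char) : List (List Char) → List (List Char)
  | [] => []
  | x :: xs => f x :: xs

theorem split1_ne_nil (cs : List Char) : split1 cs ≠ [] := by
  cases cs with
  | nil => simp [split1]
  | cons c cs =>
    simp only [split1]
    split_ifs
    · simp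
    · cases h : split1 cs <;> simp

theorem mapHead_mapHead (f g : List Char → List Char) (l : List (List Char)) :
    mapHead f (mapHead g l) = mapHead (fun t => f (g t)) l := by
  cases l <;> simp [mapHead]

theorem mapHead_id (l : List (List Char)) : mapHead (fun t => t) l = l := by
  cases l <;> simp [mapHead]

theorem mapHead_nil_append (l : List (List Char)) : mapHead (fun t => [] ++ t) l = l := by
  cases l <;> simp [mapHead]

theorem mapHead_congr (f g : List Char → List Char) (l : List (List Char))
    (h : ∀ t, f t = g t) : mapHead f l = mapHead g l := by
  cases l <;> simp [mapHead, h]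

theorem split1_cons_ne (c : Char) (cs : List Char) (h : ¬ c = '_') :
    split1 (c :: cs) = mapHead (fun t => c :: t) (split1 cs) := by
  simp only [split1, if_neg h]
  cases hs : split1 cs with
  | nil => exact absurd hs (split1_ne_nil cs)
  | cons t ts => simp [mapHead]

theorem go_eq (cs : List Char) : ∀ (fuel : Nat) (cur : List Char) (acc : List (List Char)),
    cs.length ≤ fuel →
    PySem.Chars.splitOn.go ['_'] fuel cs cur acc
      = acc.reverse ++ mapHead (fun t => cur.reverse ++ t) (split1 cs) := by
  induction cs with
  | nil =>
    intro fuel cur acc _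
    cases fuel <;> simp [PySem.Chars.splitOn.go, split1, mapHead]
  | cons c rest ih =>
    intro fuel cur acc hf
    cases fuel with
    | zero => simp at hf
    | succ n =>
      by_cases hc : c = '_'
      · subst hc
        have hgo : PySem.Chars.splitOn.go ['_'] (n+1) ('_' :: rest) cur acc
            = PySem.Chars.splitOn.go ['_'] n rest [] (cur.reverse :: acc) := by
          simp [PySem.Chars.splitOn.go, List.isPrefixOf]
        rw [hgo, ih n [] (cur.reverse :: acc) (by simpa using hf)]
        cases hs : split1 rest with
        | nil => exact absurd hs (split1_ne_nil rest)
        | cons t ts => simp [split1, mapHead, hs]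
      · have hgo : PySem.Chars.splitOn.go ['_'] (n+1) (c :: rest) cur acc
            = PySem.Chars.splitOn.go ['_'] n rest (c :: cur) acc := by
          simp [PySem.Chars.splitOn.go, List.isPrefixOf,
            (by simpa using Ne.symm hc : ('_' == c) = false)]
        rw [hgo, ih n (c :: cur) acc (by simpa using hf)]
        rw [split1_cons_ne c rest hc, mapHead_mapHead]
        exact congrArg _ (mapHead_congr _ _ _ (by simp))

theorem splitOn_eq_split1 (cs : List Char) : PySem.Chars.splitOn cs ['_'] = split1 cs := by
  unfold PySem.Chars.splitOn
  rw [go_eq cs (cs.length + 1) [] [] (by omega)]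
  simp [mapHead_id]

/-- A's loop invariant: from state (v, w) the loop yields v plus the non-empty
    non-final tokens of `mapHead (w ++ ·)` of the split, and the final token. -/
theorem foldA_eq (cs : List Char) : ∀ (v : List (List Char)) (w : List Char),
    cs.foldl pvStepA (v, w)
    = (v ++ ((mapHead (fun t => w ++ t) (split1 cs)).dropLast.filter (fun p => p ≠ [])),
       (mapHead (fun t => w ++ t) (split1 cs)).getLastD []) := by
  induction cs with
  | nil => intro v w; simp [split1, mapHead]
  | cons c rest ih =>
    intro v w
    by_cases hc : c = '_'
    · subst hc
      cases hs : split1 rest with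
      | nil => exact absurd hs (split1_ne_nil rest)
      | cons t ts =>
        by_cases hw : w = []
        · subst hw
          have hstep : pvStepA (v, ([] : List Char)) '_' = (v, []) := by simp [pvStepA]
          rw [List.foldl_cons, hstep, ih v [], mapHead_nil_append, mapHead_nil_append, hs]
          simp [split1, hs]
        · have hstep : pvStepA (v, w) '_' = (v ++ [w], []) := by simp [pvStepA, hw]
          rw [List.foldl_cons, hstep, ih (v ++ [w]) [], mapHead_nil_append, hs]
          simp [split1, mapHead, hs, hw]
    · have hstep : pvStepA (v, w) c = (v, w ++ [c]) := by simp [pvStepA, hc]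
      rw [List.foldl_cons, hstep, ih v (w ++ [c]), split1_cons_ne c rest hc, mapHead_mapHead]
      have : mapHead (fun t => w ++ c :: t) (split1 rest)
          = mapHead (fun t => (w ++ [c]) ++ t) (split1 rest) :=
        mapHead_congr _ _ _ (by simp)
      rw [this]

-- ===== VERDICT (by name: the statement is the Claim_ definition above) =====
theorem get_model_vars_spec : Claim_equal_get_model_vars := by
  intro s _
  show get_model_vars s = get_model_vars_alt s
  have hne := split1_ne_nil s.toList
  unfold get_model_vars get_model_vars_alt
  simp only [splitOn_eq_split1, PySem.List.slice_to_neg_one,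
    PySem.List.pyGetD_neg_one (split1 s.toList) ([] : List Char) hne,
    foldA_eq s.toList [] [], mapHead_id,
    List.getLastD_eq_getLast?, List.getLast?_eq_some_getLast hne, Option.getD_some, List.nil_append]
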